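-- pv_equiv track=rewrite | github.com/synaptent/RingRift | ai-service/app/ai/tensor_gumbel_tree.py | compute_sequential_halving_budget
-- ===== SOURCE A (Python) =====
-- import math
--
-- def compute_sequential_halving_budget(
--
--     total_budget: int,
--     num_actions: int,
-- ) -> list[tuple[int, int]]:
--     """Compute budget allocation for Sequential Halving.
--
--     Args:
--         total_budget: Total simulation budget
--         num_actions: Number of actions to consider
--
--     Returns:
--         List of (num_actions, sims_per_action) for each phase
--     """
--     if num_actions <= 1:
--         return [(1, total_budget)]
--
--     num_phases = int(math.ceil(math.log2(num_actions)))
--     phases = []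
--
--     remaining_actions = num_actions
--     budget_per_phase = total_budget // num_phases
--
--     for phase in range(num_phases):
--         sims_per_action = max(1, budget_per_phase // remaining_actions)
--         phases.append((remaining_actions, sims_per_action))
--         remaining_actions = max(1, remaining_actions // 2)
--
--     return phases
-- ===== SOURCE B (Python) =====
-- import math
--
--
-- def _counts(remaining, k):
--     """Recursively build the list of per-phase action counts (no accumulator)."""
--     if k == 0:
--         return []
--     return [remaining] + _counts(max(1, remaining // 2), k - 1)
--
--
-- def compute_sequential_halving_budget(
--     total_budget: int,
--     num_actions: int,
-- ) -> list[tuple[int, int]]: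
--     """Staged Sequential Halving schedule: first a recursive helper builds the
--     list of remaining-action counts by consing, then a second pass maps each
--     count to its (count, sims_per_action) pair."""
--     if num_actions <= 1:
--         return [(1, total_budget)]
--
--     num_phases = math.ceil(math.log2(num_actions))
--     budget_per_phase = total_budget // num_phases
--
--     return [(r, max(1, budget_per_phase // r))
--             for r in _counts(num_actions, num_phases)]
-- ===== Notes on version B (the rewrite author's own statement) =====
-- stated objective: alternative
-- what changed: Replaced A's single loop threading a mutable (remaining_actions, phases) accumulator with two stages: a recursive helper that builds the per-phase remaining-action counts by consing, then a map turning each count into its (count, sims) pair.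
import Mathlib
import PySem

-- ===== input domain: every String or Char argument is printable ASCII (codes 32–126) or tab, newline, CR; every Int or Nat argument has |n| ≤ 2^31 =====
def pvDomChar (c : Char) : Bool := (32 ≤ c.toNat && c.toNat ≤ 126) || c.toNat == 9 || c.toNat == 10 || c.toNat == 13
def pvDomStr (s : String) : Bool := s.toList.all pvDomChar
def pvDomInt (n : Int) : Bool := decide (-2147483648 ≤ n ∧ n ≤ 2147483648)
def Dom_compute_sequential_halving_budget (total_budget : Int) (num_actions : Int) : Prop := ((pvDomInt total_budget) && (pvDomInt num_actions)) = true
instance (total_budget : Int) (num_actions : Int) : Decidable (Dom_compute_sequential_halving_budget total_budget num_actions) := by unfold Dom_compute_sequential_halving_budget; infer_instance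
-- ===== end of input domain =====

-- B replaces A's loop-carried (remaining_actions, phases) accumulator by two stages:
-- a recursive helper builds the remaining-count list by consing, then a map forms the pairs.


-- ===== PORT A =====
-- int(math.ceil(math.log2(n))) is ported as Nat.clog 2 n.toNat: exact for 2 ≤ n ≤ 2^31
-- (the float log2 of such n is far enough from the wrong integer that ceil is exact).
def compute_sequential_halving_budget (total_budget : Int) (num_actions : Int) : List (Int × Int) :=
  if num_actions ≤ 1 then [(1, total_budget)]
  else
    let num_phases : Int := (Nat.clog 2 num_actions.toNat : Int)
    let budget_per_phase := PySem.Int.floordiv total_budget num_phases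
    ((PySem.List.pyRange 0 num_phases 1).foldl
      (fun (st : Int × List (Int × Int)) _ =>
        let sims_per_action := max 1 (PySem.Int.floordiv budget_per_phase st.1)
        (max 1 (PySem.Int.floordiv st.1 2), st.2 ++ [(st.1, sims_per_action)]))
      (num_actions, [])).2

-- ===== PORT B =====
-- Source B's _counts(remaining, k): structural recursion on the phase count k.
def shbCounts (remaining : Int) (k : Nat) : List Int :=
  match k with
  | 0 => []
  | k + 1 => remaining :: shbCounts (max 1 (PySem.Int.floordiv remaining 2)) k

def compute_sequential_halving_budget_alt (total_budget : Int) (num_actions : Int) : List (Int × Int) :=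
  if num_actions ≤ 1 then [(1, total_budget)]
  else
    let num_phases : Nat := Nat.clog 2 num_actions.toNat
    let budget_per_phase := PySem.Int.floordiv total_budget (num_phases : Int)
    (shbCounts num_actions num_phases).map
      (fun r => (r, max 1 (PySem.Int.floordiv budget_per_phase r)))

-- ===== PRECONDITION & SPEC =====
def Spec_compute_sequential_halving_budget (total_budget : Int) (num_actions : Int) (out : List (Int × Int)) : Prop := out = compute_sequential_halving_budget_alt total_budget num_actions
instance (total_budget : Int) (num_actions : Int) (out : List (Int × Int)) : Decidable (Spec_compute_sequential_halving_budget total_budget num_actions out) := by unfold Spec_compute_sequential_halving_budget; infer_instance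

-- ===== CLAIM (what is proved, stated in full; the proofs are below) =====
def Claim_equal_compute_sequential_halving_budget : Prop := ∀ (total_budget : Int) (num_actions : Int), Dom_compute_sequential_halving_budget total_budget num_actions → Spec_compute_sequential_halving_budget total_budget num_actions (compute_sequential_halving_budget total_budget num_actions)

-- ===== LEMMAS AND PROOFS =====

-- A's fold over any k-element phase list produces exactly B's staged map over shbCounts,
-- with the expected final remaining count; induction on the list, generalizing the state.
theorem shb_fold (bpp : Int) :
    ∀ (l : List Int) (n : Int) (acc : List (Int × Int)),
    (l.foldl
      (fun (st : Int × List (Int × Int)) _ =>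
        (max 1 (PySem.Int.floordiv st.1 2),
         st.2 ++ [(st.1, max 1 (PySem.Int.floordiv bpp st.1))]))
      (n, acc)).2
    = acc ++ (shbCounts n l.length).map
        (fun r => (r, max 1 (PySem.Int.floordiv bpp r))) := by
  intro l
  induction l with
  | nil => intro n acc; simp [shbCounts]
  | cons x xs ih =>
    intro n acc
    simp only [List.foldl_cons, List.length_cons, shbCounts, List.map_cons]
    rw [ih]
    simp

-- ===== VERDICT (by name: the statement is the Claim_ definition above) =====
theorem compute_sequential_halving_budget_spec : Claim_equal_compute_sequential_halving_budget := by
  intro total_budget num_actions _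
  unfold Spec_compute_sequential_halving_budget
  unfold compute_sequential_halving_budget compute_sequential_halving_budget_alt
  by_cases h : num_actions ≤ 1
  · simp [h]
  · simp only [h, if_false]
    rw [shb_fold]
    rw [PySem.List.length_pyRange_one]
    simp
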